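-- pv_equiv track=rewrite | github.com/LemonDrew/codeSDK | routes/safeguard.py | reverse_double_consonants
-- ===== SOURCE A (Python) =====
-- def reverse_double_consonants(text):
--     """Reverse: remove doubled consonants"""
--     vowels = set('aeiouAEIOU')
--     result = []
--     i = 0
--     while i < len(text):
--         char = text[i]
--         if char.isalpha() and char not in vowels:
--             # Check if next character is the same (doubled consonant)
--             if i + 1 < len(text) and text[i + 1] == char:
--                 result.append(char)  # Add only one
--                 i += 2  # Skip the doubled character
--             else:
--                 result.append(char)
--                 i += 1
--         else:
--             result.append(char)
--             i += 1
--     return ''.join(result)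
-- ===== SOURCE B (Python) =====
-- import re
--
-- def reverse_double_consonants(text):
--     """Reverse: remove doubled consonants"""
--     vowels = set('aeiouAEIOU')
--
--     def collapse(m):
--         c = m.group(1)
--         if c.isalpha() and c not in vowels:
--             return c
--         return m.group(0)
--
--     return re.sub(r'(.)\1', collapse, text, flags=re.DOTALL)
-- ===== Notes on version B (the rewrite author's own statement) =====
-- stated objective: idiomatic
-- what changed: Replaces A's index-driven while loop with per-branch step sizes by a single re.sub over the pattern (.)\1 with a callback that keeps one character for a doubled consonant and the full match otherwise.
import Mathlib
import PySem

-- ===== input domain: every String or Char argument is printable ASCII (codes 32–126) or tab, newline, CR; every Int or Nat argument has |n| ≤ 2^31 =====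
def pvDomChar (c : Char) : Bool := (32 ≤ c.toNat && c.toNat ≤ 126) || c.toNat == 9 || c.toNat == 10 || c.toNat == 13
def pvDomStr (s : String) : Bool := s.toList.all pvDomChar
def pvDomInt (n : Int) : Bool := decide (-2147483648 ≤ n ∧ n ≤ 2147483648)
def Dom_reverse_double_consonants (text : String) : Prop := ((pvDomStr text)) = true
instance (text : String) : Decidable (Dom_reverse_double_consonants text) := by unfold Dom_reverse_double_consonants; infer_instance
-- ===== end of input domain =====

-- B collapses doubled consonants by a single regex-style non-overlapping pair scan instead of A's index loop (objective: idiomatic).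

-- ===== PORT A =====
-- A's while loop over indices, transcribed as recursion on the suffix of the character list:
-- at each step the loop head is text[i] and the rest is text[i+1:].
def pvVowels : List Char := ['a', 'e', 'i', 'o', 'u', 'A', 'E', 'I', 'O', 'U']

def pvGoA : List Char → List Char
  | [] => []
  | c :: rest =>
    if PySem.Chars.isalpha c = true ∧ c ∉ pvVowels then
      match rest with
      | d :: rest' => if d = c then c :: pvGoA rest' else c :: pvGoA (d :: rest')
      | [] => c :: pvGoA []
    else c :: pvGoA rest

def reverse_double_consonants (text : String) : String :=
  String.ofList (pvGoA text.toList)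

-- ===== PORT B =====
-- Source B's re.sub(r'(.)\1', collapse, text): a left-to-right scan for a pair of equal
-- adjacent characters; on a match the callback keeps one char for a consonant, both
-- otherwise, and the scan resumes AFTER the matched pair; otherwise it moves one char on.
def pvPairScan : List Char → List Char
  | [] => []
  | [c] => [c]
  | c :: d :: rest =>
    if d = c then
      (if PySem.Chars.isalpha c = true && !(c ∈ pvVowels) then [c] else [c, d]) ++ pvPairScan rest
    else
      c :: pvPairScan (d :: rest)

def reverse_double_consonants_alt (text : String) : String :=
  String.ofList (pvPairScan text.toList)

-- ===== PRECONDITION & SPEC =====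
def Spec_reverse_double_consonants (text : String) (out : String) : Prop := out = reverse_double_consonants_alt text
instance (text : String) (out : String) : Decidable (Spec_reverse_double_consonants text out) := by unfold Spec_reverse_double_consonants; infer_instance

-- ===== CLAIM (what is proved, stated in full; the proofs are below) =====
def Claim_equal_reverse_double_consonants : Prop := ∀ (text : String), Dom_reverse_double_consonants text → Spec_reverse_double_consonants text (reverse_double_consonants text)

-- ===== LEMMAS AND PROOFS =====

theorem pvGoA_cons_of_not (c : Char) (rest : List Char)
    (hc : ¬(PySem.Chars.isalpha c = true ∧ c ∉ pvVowels)) :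
    pvGoA (c :: rest) = c :: pvGoA rest := by
  cases rest <;> simp [pvGoA, hc]

theorem pvGoA_eq_pvPairScan (l : List Char) : pvGoA l = pvPairScan l := by
  induction l using pvPairScan.induct with
  | case1 => rfl
  | case2 c => simp [pvGoA, pvPairScan]
  | case3 c rest ih =>
      -- doubled pair: the list is c :: c :: rest
      by_cases hc : PySem.Chars.isalpha c = true ∧ c ∉ pvVowels
      · simp [pvGoA, pvPairScan, hc, ih]
      · rw [pvGoA_cons_of_not c (c :: rest) hc, pvGoA_cons_of_not c rest hc, ih]
        rcases not_and_or.mp hc with h | h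
        · simp [pvPairScan, h]
        · have h' : c ∈ pvVowels := not_not.mp h
          simp [pvPairScan, h']
  | case4 c d rest hd ih =>
      by_cases hc : PySem.Chars.isalpha c = true ∧ c ∉ pvVowels
      · simp [pvGoA, pvPairScan, hc, hd, ih]
      · simp [pvGoA, pvPairScan, hc, hd, ih]

-- ===== VERDICT (by name: the statement is the Claim_ definition above) =====
theorem reverse_double_consonants_spec : Claim_equal_reverse_double_consonants := by
  intro text _
  unfold Spec_reverse_double_consonants reverse_double_consonants reverse_double_consonants_alt
  rw [pvGoA_eq_pvPairScan]
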